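-- pv_equiv track=rewrite | github.com/Dootsire/AoC-2024 | day12/fencePrice.py | calc_perimeter
-- ===== SOURCE A (Python) =====
-- def calc_perimeter(char_set):
--     perimeter = 0
--     for coords in char_set:
--         directions = [(coords[0] + 1, coords[1]), (coords[0], coords[1] + 1),
--                   (coords[0] - 1, coords[1]), (coords[0], coords[1] - 1)]
--         for dir in directions:
--             if dir not in char_set:
--                 perimeter += 1
--     return perimeter
-- ===== SOURCE B (Python) =====
-- def calc_perimeter(char_set):
--     cells = set(char_set)
--     edges = sum(1 for (x, y) in cells
--                 for nb in ((x + 1, y), (x, y + 1)) if nb in cells)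
--     return 4 * len(cells) - 2 * edges
-- ===== Notes on version B (the rewrite author's own statement) =====
-- stated objective: alternative
-- what changed: B counts each shared internal edge exactly once by checking only the right/up neighbor of each cell and returns 4*n - 2*edges, instead of A's per-cell count of absent neighbors in all four directions; Pre_ (Nodup on the Lean list model) merely reflects that char_set is a set and has no duplicate cells.
import Mathlib
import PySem

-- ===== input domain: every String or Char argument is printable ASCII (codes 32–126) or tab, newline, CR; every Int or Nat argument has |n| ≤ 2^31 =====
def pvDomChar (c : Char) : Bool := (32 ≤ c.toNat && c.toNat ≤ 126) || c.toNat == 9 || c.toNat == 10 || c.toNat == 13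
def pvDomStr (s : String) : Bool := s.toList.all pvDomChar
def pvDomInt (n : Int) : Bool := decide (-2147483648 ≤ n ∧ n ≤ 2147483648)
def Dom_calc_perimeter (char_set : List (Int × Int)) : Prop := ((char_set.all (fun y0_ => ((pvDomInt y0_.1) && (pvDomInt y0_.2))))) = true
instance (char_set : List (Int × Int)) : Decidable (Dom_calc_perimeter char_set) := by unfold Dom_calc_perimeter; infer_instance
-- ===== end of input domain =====

-- B hashes the cells into a set once and counts each shared internal edge exactly once
-- (right/up neighbors only), returning 4*n - 2*edges instead of A's per-cell absent-neighbor count.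

-- ===== PORT A =====
def calc_perimeter (char_set : List (Int × Int)) : Int :=
  char_set.foldl (fun perimeter coords =>
    let directions := [(coords.1 + 1, coords.2), (coords.1, coords.2 + 1),
                       (coords.1 - 1, coords.2), (coords.1, coords.2 - 1)]
    directions.foldl (fun p dir =>
      if char_set.contains dir then p else p + 1) perimeter) 0

-- ===== PORT B =====
def calc_perimeter_alt (char_set : List (Int × Int)) : Int :=
  let cells := PySem.Set.ofList char_set
  let edges : Int := cells.foldl (fun e k =>
    [(k.1 + 1, k.2), (k.1, k.2 + 1)].foldl (fun e nb =>
      if PySem.Set.contains cells nb then e + 1 else e) e) 0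
  4 * (cells.length : Int) - 2 * edges

-- ===== PRECONDITION & SPEC =====
-- Pre_ excludes lists with duplicate cells: the parameter is semantically a set of cells, and
-- A's multiplicity-weighted count on duplicates is an accident of passing a list.
def Pre_calc_perimeter (char_set : List (Int × Int)) : Prop := char_set.Nodup
instance (char_set : List (Int × Int)) : Decidable (Pre_calc_perimeter char_set) := by unfold Pre_calc_perimeter; infer_instance
def pvWitness_calc_perimeter : (List (Int × Int)) := [(0, 0), (1, 0), (0, 1)]
def Spec_calc_perimeter (char_set : List (Int × Int)) (out : Int) : Prop := out = calc_perimeter_alt char_set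
instance (char_set : List (Int × Int)) (out : Int) : Decidable (Spec_calc_perimeter char_set out) := by unfold Spec_calc_perimeter; infer_instance

-- ===== CLAIM =====
def Claim_equal_calc_perimeter : Prop := ∀ (char_set : List (Int × Int)), Dom_calc_perimeter char_set → Pre_calc_perimeter char_set → Spec_calc_perimeter char_set (calc_perimeter char_set)

-- ===== LEMMAS AND PROOFS =====

-- indicator of membership in L
def pvChi (L : List (Int × Int)) (y : Int × Int) : Int := if y ∈ L then 1 else 0

-- A's fold equals the sum of per-cell absent-neighbor counts
theorem pvA_sum (L : List (Int × Int)) :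
    calc_perimeter L =
      (L.map (fun c => (4 : Int)
        - pvChi L (c.1 + 1, c.2) - pvChi L (c.1, c.2 + 1)
        - pvChi L (c.1 - 1, c.2) - pvChi L (c.1, c.2 - 1))).sum := by
  have inner : ∀ (per : Int) (c : Int × Int),
      ([(c.1 + 1, c.2), (c.1, c.2 + 1), (c.1 - 1, c.2), (c.1, c.2 - 1)] :
        List (Int × Int)).foldl (fun p dir => if L.contains dir then p else p + 1) per
      = per + ((4 : Int) - pvChi L (c.1 + 1, c.2) - pvChi L (c.1, c.2 + 1)
          - pvChi L (c.1 - 1, c.2) - pvChi L (c.1, c.2 - 1)) := by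
    intro per c
    simp only [List.foldl, pvChi, List.contains_iff_mem]
    split_ifs <;> ring
  show List.foldl (fun per c =>
      ([(c.1 + 1, c.2), (c.1, c.2 + 1), (c.1 - 1, c.2), (c.1, c.2 - 1)] :
        List (Int × Int)).foldl (fun p dir => if L.contains dir then p else p + 1) per) 0 L = _
  simp only [inner]
  rw [PySem.List.foldl_add]
  ring

-- B's fold equals 4*len minus twice the right/up adjacency sum, for a duplicate-free list
theorem pvB_sum (L : List (Int × Int)) (h : L.Nodup) :
    calc_perimeter_alt L =
      4 * (L.length : Int)
      - 2 * (L.map (fun k => pvChi L (k.1 + 1, k.2) + pvChi L (k.1, k.2 + 1))).sum := by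
  have hself : PySem.Set.ofList L = L := PySem.Set.ofList_eq_self_of_nodup L h
  have inner : ∀ (e : Int) (k : Int × Int),
      ([(k.1 + 1, k.2), (k.1, k.2 + 1)] : List (Int × Int)).foldl (fun e nb =>
        if PySem.Set.contains L nb then e + 1 else e) e
      = e + (pvChi L (k.1 + 1, k.2) + pvChi L (k.1, k.2 + 1)) := by
    intro e k
    simp only [List.foldl, pvChi, PySem.Set.contains_iff]
    split_ifs <;> ring
  show (let cells := PySem.Set.ofList L
    let edges : Int := cells.foldl (fun e k =>
      [(k.1 + 1, k.2), (k.1, k.2 + 1)].foldl (fun e nb =>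
        if PySem.Set.contains cells nb then e + 1 else e) e) 0
    4 * (cells.length : Int) - 2 * edges) = _
  simp only [hself]
  simp only [inner]
  rw [PySem.List.foldl_add]
  ring

-- shift identity: for inverse bijections g, h on the grid, summing over a duplicate-free L
-- the indicator of 'h x ∈ L' equals summing the indicator of 'g x ∈ L'
theorem pvShift (L : List (Int × Int)) (h : L.Nodup) (g hf : Int × Int → Int × Int)
    (hg : ∀ x, hf (g x) = x) (hh : ∀ x, g (hf x) = x) :
    (L.map (fun x => pvChi L (hf x))).sum = (L.map (fun x => pvChi L (g x))).sum := by
  have hginj : Function.Injective g := fun a b hab => by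
    have := congrArg hf hab; simpa [hg] using this
  rw [← List.sum_toFinset _ h, ← List.sum_toFinset _ h]
  have lhs1 : (∑ x ∈ L.toFinset, pvChi L (hf x))
      = ∑ x ∈ L.toFinset.filter (fun x => hf x ∈ L), (1 : Int) := by
    rw [Finset.sum_filter]
    exact Finset.sum_congr rfl (fun x _ => by by_cases hm : hf x ∈ L <;> simp [pvChi, hm])
  have rhs1 : (∑ x ∈ L.toFinset, pvChi L (g x))
      = ∑ x ∈ L.toFinset.filter (fun x => g x ∈ L), (1 : Int) := by
    rw [Finset.sum_filter]
    exact Finset.sum_congr rfl (fun x _ => by by_cases hm : g x ∈ L <;> simp [pvChi, hm])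
  rw [lhs1, rhs1, Finset.sum_const, Finset.sum_const]
  congr 1
  apply Finset.card_nbij (fun x => hf x)
  · intro x hx
    simp only [Finset.coe_filter, Set.mem_setOf_eq, List.mem_toFinset] at *
    exact ⟨hx.2, by rw [hh]; exact hx.1⟩
  · intro a ha b hb hab
    simpa [hh] using congrArg g hab
  · intro y hy
    simp only [Finset.coe_filter, Set.mem_setOf_eq, List.mem_toFinset] at *
    exact ⟨g y, ⟨hy.2, by rw [hg]; exact hy.1⟩, hg y⟩

-- splitting a summed map of a difference / sum into separate map sums
theorem pvSplit4 (L M : List (Int × Int)) :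
    (L.map (fun c => (4 : Int)
        - pvChi M (c.1 + 1, c.2) - pvChi M (c.1, c.2 + 1)
        - pvChi M (c.1 - 1, c.2) - pvChi M (c.1, c.2 - 1))).sum
      = 4 * (L.length : Int)
        - (L.map (fun c => pvChi M (c.1 + 1, c.2))).sum
        - (L.map (fun c => pvChi M (c.1, c.2 + 1))).sum
        - (L.map (fun c => pvChi M (c.1 - 1, c.2))).sum
        - (L.map (fun c => pvChi M (c.1, c.2 - 1))).sum := by
  induction L with
  | nil => simp
  | cons a t ih =>
    simp only [List.map_cons, List.sum_cons, List.length_cons]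
    push_cast
    linarith [ih]

theorem pvSplit2 (L M : List (Int × Int)) :
    (L.map (fun k => pvChi M (k.1 + 1, k.2) + pvChi M (k.1, k.2 + 1))).sum
      = (L.map (fun c => pvChi M (c.1 + 1, c.2))).sum
        + (L.map (fun c => pvChi M (c.1, c.2 + 1))).sum := by
  induction L with
  | nil => simp
  | cons a t ih =>
    simp only [List.map_cons, List.sum_cons]
    linarith [ih]

-- ===== VERDICT =====
theorem calc_perimeter_spec : Claim_equal_calc_perimeter := by
  intro L _ hpre
  show calc_perimeter L = calc_perimeter_alt L
  rw [pvA_sum, pvB_sum L hpre]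
  have hr := pvShift L hpre (fun c => (c.1 + 1, c.2)) (fun c => (c.1 - 1, c.2))
      (fun x => by simp) (fun x => by simp)
  have hu := pvShift L hpre (fun c => (c.1, c.2 + 1)) (fun c => (c.1, c.2 - 1))
      (fun x => by simp) (fun x => by simp)
  beta_reduce at hr hu
  rw [pvSplit4 L L, pvSplit2 L L]
  linarith [hr, hu]
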